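-- pv_equiv track=rewrite | github.com/michaelecalle/limgpt | src/data/export_ligneFT_to_csv.py | split_top_level_objects
-- ===== SOURCE A (Python) =====
-- def split_top_level_objects(arr_body: str):
--     objs = []
--     i=0; n=len(arr_body)
--     while i<n:
--         while i<n and arr_body[i] in " \t\r\n,":
--             i+=1
--         if i>=n: break
--         if arr_body[i] != "{":
--             i+=1; continue
--         depth=0; in_str=False; esc=False
--         start=i
--         while i<n:
--             ch=arr_body[i]
--             if in_str:
--                 if esc: esc=False
--                 elif ch=="\\": esc=True
--                 elif ch=='"': in_str=False
--             else:
--                 if ch=='"': in_str=True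
--                 elif ch=='{': depth+=1
--                 elif ch=='}':
--                     depth-=1
--                     if depth==0:
--                         i+=1; break
--             i+=1
--         objs.append(arr_body[start:i].strip())
--     return objs
-- ===== SOURCE B (Python) =====
-- def split_top_level_objects(arr_body: str):
--     objs = []
--     buf = None
--     depth = 0
--     in_str = False
--     esc = False
--     for ch in arr_body:
--         if buf is None:
--             if ch == "{":
--                 buf = [ch]
--                 depth = 1
--                 in_str = False
--                 esc = False
--         else:
--             buf.append(ch)
--             if in_str:
--                 if esc:
--                     esc = False
--                 elif ch == "\\":
--                     esc = True
--                 elif ch == '"':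
--                     in_str = False
--             else:
--                 if ch == '"':
--                     in_str = True
--                 elif ch == "{":
--                     depth += 1
--                 elif ch == "}":
--                     depth -= 1
--                     if depth == 0:
--                         objs.append("".join(buf).strip())
--                         buf = None
--     if buf is not None:
--         objs.append("".join(buf).strip())
--     return objs
-- ===== Notes on version B (the rewrite author's own statement) =====
-- stated objective: simpler
-- what changed: Replaced A's nested loops with manual index arithmetic and slicing (outer scan-restart loop, inner whitespace-skip loop, inner object loop) by a single flat state-machine pass over the characters that carries an optional buffer: outside an object only '{' starts a buffer, inside it the brace/string/escape state is updated and the buffer is flushed when depth returns to 0, with one post-loop flush for an unterminated object.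
import Mathlib
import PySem

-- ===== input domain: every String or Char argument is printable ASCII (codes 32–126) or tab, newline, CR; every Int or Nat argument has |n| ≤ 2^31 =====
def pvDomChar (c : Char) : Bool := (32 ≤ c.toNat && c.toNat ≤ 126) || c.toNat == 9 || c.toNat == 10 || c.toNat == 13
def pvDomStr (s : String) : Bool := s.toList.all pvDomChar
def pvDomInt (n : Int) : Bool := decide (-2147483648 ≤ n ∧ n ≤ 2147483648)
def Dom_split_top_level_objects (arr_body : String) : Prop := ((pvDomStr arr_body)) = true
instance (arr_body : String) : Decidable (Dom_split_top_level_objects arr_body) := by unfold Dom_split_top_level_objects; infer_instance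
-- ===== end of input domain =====

-- B rewrites A's three nested index-driven loops as one flat state-machine pass with an
-- optional buffer (objective: simpler); same return value on every input.

-- ===== PORT A =====
-- A's inner object-scanning while loop: consumes chars from the '{' on, accumulating the
-- slice arr_body[start:i] as `acc`; returns (object chars, remaining suffix).
def pvAScan (depth : Int) (in_str esc : Bool) (acc : List Char) : List Char → List Char × List Char
  | [] => (acc, [])
  | ch :: rest =>
    if in_str then
      if esc then pvAScan depth in_str false (acc ++ [ch]) rest
      else if ch = '\\' then pvAScan depth in_str true (acc ++ [ch]) rest
      else if ch = '"' then pvAScan depth false esc (acc ++ [ch]) rest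
      else pvAScan depth in_str esc (acc ++ [ch]) rest
    else
      if ch = '"' then pvAScan depth true esc (acc ++ [ch]) rest
      else if ch = '{' then pvAScan (depth + 1) in_str esc (acc ++ [ch]) rest
      else if ch = '}' then
        if depth - 1 = 0 then (acc ++ [ch], rest)
        else pvAScan (depth - 1) in_str esc (acc ++ [ch]) rest
      else pvAScan depth in_str esc (acc ++ [ch]) rest

-- needed by pvAOuter's termination proof: the inner loop only consumes characters
theorem pvAScan_snd_length_le (depth : Int) (in_str esc : Bool) (acc l : List Char) :
    (pvAScan depth in_str esc acc l).2.length ≤ l.length := by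
  induction l generalizing depth in_str esc acc with
  | nil => simp [pvAScan]
  | cons ch rest ih =>
    simp only [pvAScan]
    split_ifs <;> simp <;> exact le_trans (ih _ _ _ _) (Nat.le_succ _)

-- A's outer while loop: skip whitespace/commas and stray chars; on '{' run the inner loop
def pvAOuter (l : List Char) : List String :=
  match l with
  | [] => []
  | ch :: rest =>
    if ch = ' ' ∨ ch = '\t' ∨ ch = '\r' ∨ ch = '\n' ∨ ch = ',' then pvAOuter rest
    else if ch ≠ '{' then pvAOuter rest
    else
      PySem.Str.strip (String.mk (pvAScan 0 false false [] (ch :: rest)).1) ::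
        pvAOuter (pvAScan 0 false false [] (ch :: rest)).2
termination_by l.length
decreasing_by
  · simp
  · simp
  · have h : pvAScan 0 false false [] (ch :: rest) = pvAScan 1 false false ['{'] rest := by
      simp_all [pvAScan]
    rw [h]
    exact Nat.lt_succ_of_le (pvAScan_snd_length_le 1 false false ['{'] rest)

def split_top_level_objects (arr_body : String) : List String :=
  pvAOuter arr_body.toList

-- ===== PORT B =====
-- state: (objs so far, optional current-object buffer, depth, in_str, esc)
def pvBStep (st : List String × Option (List Char) × Int × Bool × Bool) (ch : Char) :
    List String × Option (List Char) × Int × Bool × Bool :=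
  match st with
  | (objs, none, depth, in_str, esc) =>
    if ch = '{' then (objs, some [ch], 1, false, false) else (objs, none, depth, in_str, esc)
  | (objs, some buf, depth, in_str, esc) =>
    let buf' := buf ++ [ch]
    if in_str then
      if esc then (objs, some buf', depth, in_str, false)
      else if ch = '\\' then (objs, some buf', depth, in_str, true)
      else if ch = '"' then (objs, some buf', depth, false, esc)
      else (objs, some buf', depth, in_str, esc)
    else
      if ch = '"' then (objs, some buf', depth, true, esc)
      else if ch = '{' then (objs, some buf', depth + 1, in_str, esc)
      else if ch = '}' then
        if depth - 1 = 0 then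
          (objs ++ [PySem.Str.strip (String.mk buf')], none, depth - 1, in_str, esc)
        else (objs, some buf', depth - 1, in_str, esc)
      else (objs, some buf', depth, in_str, esc)

def split_top_level_objects_alt (arr_body : String) : List String :=
  let st := arr_body.toList.foldl pvBStep ([], none, 0, false, false)
  match st.2.1 with
  | none => st.1
  | some buf => st.1 ++ [PySem.Str.strip (String.mk buf)]

-- ===== PRECONDITION & SPEC =====
def Spec_split_top_level_objects (arr_body : String) (out : List String) : Prop := out = split_top_level_objects_alt arr_body
instance (arr_body : String) (out : List String) : Decidable (Spec_split_top_level_objects arr_body out) := by unfold Spec_split_top_level_objects; infer_instance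

-- ===== CLAIM (what is proved, stated in full; the proofs are below) =====
def Claim_equal_split_top_level_objects : Prop := ∀ (arr_body : String), Dom_split_top_level_objects arr_body → Spec_split_top_level_objects arr_body (split_top_level_objects arr_body)

-- ===== LEMMAS AND PROOFS =====

-- flush B's final state: pending buffer becomes one last (stripped) object
def pvFinish (st : List String × Option (List Char) × Int × Bool × Bool) : List String :=
  match st.2.1 with
  | none => st.1
  | some buf => st.1 ++ [PySem.Str.strip (String.mk buf)]

theorem pvKey (l : List Char) :
    (∀ objs (d : Int) (s e : Bool),
      pvFinish (l.foldl pvBStep (objs, none, d, s, e)) = objs ++ pvAOuter l) ∧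
    (∀ objs acc (d : Int) (s e : Bool),
      pvFinish (l.foldl pvBStep (objs, some acc, d, s, e)) =
        objs ++ PySem.Str.strip (String.mk (pvAScan d s e acc l).1) ::
          pvAOuter (pvAScan d s e acc l).2) := by
  induction l with
  | nil => constructor <;> intros <;> simp [pvFinish, pvAScan, pvAOuter]
  | cons ch rest ih =>
    constructor
    · intro objs d s e
      by_cases hb : ch = '{'
      · subst hb
        have hA : pvAScan 0 false false [] ('{' :: rest) = pvAScan 1 false false ['{'] rest := by
          simp [pvAScan]
        rw [pvAOuter]
        simp only [List.foldl, pvBStep, if_pos rfl, hA]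
        simpa using ih.2 objs ['{'] 1 false false
      · rw [pvAOuter]
        simp only [List.foldl, pvBStep, if_neg hb]
        rcases Decidable.em (ch = ' ' ∨ ch = '\t' ∨ ch = '\r' ∨ ch = '\n' ∨ ch = ',') with hw | hw
        · rw [if_pos hw]; exact ih.1 objs d s e
        · rw [if_neg hw, if_pos hb]; exact ih.1 objs d s e
    · intro objs acc d s e
      simp only [List.foldl, pvBStep, pvAScan]
      by_cases hs : s = true
      · subst hs
        by_cases he : e = true
        · subst he; simp only [if_pos rfl]; exact ih.2 _ _ _ _ _
        · simp only [he, Bool.false_eq_true, if_false] at *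
          by_cases h1 : ch = '\\'
          · simp only [if_pos h1]; exact ih.2 _ _ _ _ _
          · simp only [if_neg h1]
            by_cases h2 : ch = '"'
            · simp only [if_pos h2]; exact ih.2 _ _ _ _ _
            · simp only [if_neg h2]; exact ih.2 _ _ _ _ _
      · simp only [Bool.not_eq_true] at hs; subst hs
        simp only [Bool.false_eq_true, if_false]
        by_cases h2 : ch = '"'
        · simp only [if_pos h2]; exact ih.2 _ _ _ _ _
        · simp only [if_neg h2]
          by_cases h3 : ch = '{'
          · simp only [if_pos h3]; exact ih.2 _ _ _ _ _
          · simp only [if_neg h3]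
            by_cases h4 : ch = '}'
            · simp only [if_pos h4]
              by_cases h5 : d - 1 = 0
              · simp only [if_pos h5]
                rw [ih.1]
                simp
              · simp only [if_neg h5]; exact ih.2 _ _ _ _ _
            · simp only [if_neg h4]; exact ih.2 _ _ _ _ _

-- ===== VERDICT (by name: the statement is the Claim_ definition above) =====
theorem split_top_level_objects_spec : Claim_equal_split_top_level_objects := by
  intro arr_body _
  unfold Spec_split_top_level_objects split_top_level_objects split_top_level_objects_alt
  have h := (pvKey arr_body.toList).1 [] 0 false false
  simpa [pvFinish] using h.symm
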